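-- pv_equiv track=rewrite | github.com/Kysarii/7lab | 675.py | find_square_alg
-- ===== SOURCE A (Python) =====
-- def square(a, b, c, d):
--     if a == b and a == c and a == d and b == c and b == d and c == d:
--         return False
--     else:
--         s1 = (a['x'] - b['x']) ** 2 + (a['y'] - b['y']) ** 2
--         s2 = (a['x'] - c['x']) ** 2 + (a['y'] - c['y']) ** 2
--         s3 = (a['x'] - d['x']) ** 2 + (a['y'] - d['y']) ** 2
--         s4 = (b['x'] - c['x']) ** 2 + (b['y'] - c['y']) ** 2
--         s5 = (b['x'] - d['x']) ** 2 + (b['y'] - d['y']) ** 2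
--         s6 = (c['x'] - d['x']) ** 2 + (c['y'] - d['y']) ** 2
--         return ((s1 == s3) and (s1 == s4) and (s1 == s6) and (s2 == s5) and (s2 == 2 * s1)) \
--             or ((s1 == s2) and (s1 == s5) and (s1 == s6) and (s3 == s4) and (s3 == 2 * s1)) \
--             or ((s2 == s3) and (s2 == s4) and (s2 == s5) and (s1 == s6) and (s1 == 2 * s2))
--
-- def find_square_alg(t, n):
--     s_list = []
--     n_list = []
--     for i in range(n):
--         for j in range(i + 1, n):
--             for k in range(j + 1, n):
--                 for l in range(k + 1, n):
--                     if square(t[i], t[j], t[k], t[l]):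
--                         s_list.append([[t[i]['x'], t[i]['y']],
--                                        [t[j]['x'], t[j]['y']],
--                                        [t[k]['x'], t[k]['y']],
--                                        [t[l]['x'], t[l]['y']]])
--                     else:
--                         n_list.append([[t[i]['x'], t[i]['y']],
--                                        [t[j]['x'], t[j]['y']],
--                                        [t[k]['x'], t[k]['y']],
--                                        [t[l]['x'], t[l]['y']]])
--     return s_list, n_list
-- ===== SOURCE B (Python) =====
-- def _diag_square(p, r, q, s):
--     # (p, r) and (q, s) taken as the diagonals of the candidate square:
--     # same midpoint, and one diagonal is the other rotated by 90 degrees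
--     # (equal length + perpendicular), nondegenerate.
--     return (p != r
--             and p[0] + r[0] == q[0] + s[0]
--             and p[1] + r[1] == q[1] + s[1]
--             and (q[0] - s[0], q[1] - s[1]) in ((r[1] - p[1], p[0] - r[0]),
--                                                (p[1] - r[1], r[0] - p[0])))
--
--
-- def _is_square(a, b, c, d):
--     # try each of the three ways to split the four points into two diagonals
--     return (_diag_square(a, c, b, d)
--             or _diag_square(a, d, b, c)
--             or _diag_square(a, b, c, d))
--
--
-- def find_square_alg(t, n):
--     s_list = []
--     n_list = []
--     for i in range(n):
--         for j in range(i + 1, n):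
--             for k in range(j + 1, n):
--                 for l in range(k + 1, n):
--                     pi = [t[i]['x'], t[i]['y']]
--                     pj = [t[j]['x'], t[j]['y']]
--                     pk = [t[k]['x'], t[k]['y']]
--                     pl = [t[l]['x'], t[l]['y']]
--                     quad = [pi, pj, pk, pl]
--                     if _is_square(tuple(pi), tuple(pj), tuple(pk), tuple(pl)):
--                         s_list.append(quad)
--                     else:
--                         n_list.append(quad)
--     return s_list, n_list
-- ===== Notes on version B (the rewrite author's own statement) =====
-- stated objective: alternative
-- what changed: The square test is replaced: instead of A's three written-out six-squared-distance equality patterns (guarded by full dict equality), B checks, for each of the three diagonal pairings, that the two diagonals share their midpoint and one is the 90-degree rotation of the other (a vector test with no multiplications).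
-- intended difference: On inputs whose first n points contain four coincident points (same 'x'/'y' values) whose dicts are not all equal as mappings (e.g. an extra key), A lists that quadruple as a square while B lists it as a non-square; B is intended, since four coincident points never form a square and A itself rejects them when the dicts are equal. — e.g. on find_square_alg([[("x", 0), ("y", 0)], [("x", 0), ("y", 0)], [("x", 0), ("y", 0)], [("x", 0), ("y", 0), ("z", 1)]], 4): A returns ([[[0, 0], [0, 0], [0, 0], [0, 0]]], []), B returns ([], [[[0, 0], [0, 0], [0, 0], [0, 0]]])
import Mathlib
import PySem

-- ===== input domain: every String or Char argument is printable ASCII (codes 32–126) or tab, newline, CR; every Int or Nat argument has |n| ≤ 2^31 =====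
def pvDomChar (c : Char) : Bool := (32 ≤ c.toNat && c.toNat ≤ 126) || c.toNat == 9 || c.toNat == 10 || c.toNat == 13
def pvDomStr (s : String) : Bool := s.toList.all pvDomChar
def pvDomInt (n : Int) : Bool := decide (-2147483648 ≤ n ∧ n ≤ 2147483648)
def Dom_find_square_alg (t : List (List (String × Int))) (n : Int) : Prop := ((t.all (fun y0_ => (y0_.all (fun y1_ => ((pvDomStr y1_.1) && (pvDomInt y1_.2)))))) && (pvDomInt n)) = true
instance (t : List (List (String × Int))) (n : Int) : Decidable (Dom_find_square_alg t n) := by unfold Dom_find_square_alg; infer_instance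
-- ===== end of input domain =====

set_option maxHeartbeats 1000000


-- B replaces A's six-squared-distances pattern test by a midpoint-plus-rotated-diagonal
-- vector test over the three diagonal pairings (objective: alternative; same O(n^4) cost).

-- ===== PORT A =====
-- d['x'] / d['y']: first-match lookup in the association list; Pre_ guarantees the key
-- is present (Python raises KeyError otherwise), so the `getD 0` default is never used
-- on admitted inputs.
def pvX (p : List (String × Int)) : Int := (p.lookup "x").getD 0
def pvY (p : List (String × Int)) : Int := (p.lookup "y").getD 0

-- Python's `a == b` on dicts: equal as mappings (same key set, same values).
def pvEqv (a b : List (String × Int)) : Bool :=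
  a.all (fun kv => b.lookup kv.1 == a.lookup kv.1) &&
  b.all (fun kv => a.lookup kv.1 == b.lookup kv.1)

def pvSquare (a b c d : List (String × Int)) : Bool :=
  if pvEqv a b && pvEqv a c && pvEqv a d && pvEqv b c && pvEqv b d && pvEqv c d then
    false
  else
    let s1 := (pvX a - pvX b)^2 + (pvY a - pvY b)^2
    let s2 := (pvX a - pvX c)^2 + (pvY a - pvY c)^2
    let s3 := (pvX a - pvX d)^2 + (pvY a - pvY d)^2
    let s4 := (pvX b - pvX c)^2 + (pvY b - pvY c)^2
    let s5 := (pvX b - pvX d)^2 + (pvY b - pvY d)^2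
    let s6 := (pvX c - pvX d)^2 + (pvY c - pvY d)^2
    decide ((s1 = s3 ∧ s1 = s4 ∧ s1 = s6 ∧ s2 = s5 ∧ s2 = 2 * s1)
      ∨ (s1 = s2 ∧ s1 = s5 ∧ s1 = s6 ∧ s3 = s4 ∧ s3 = 2 * s1)
      ∨ (s2 = s3 ∧ s2 = s4 ∧ s2 = s5 ∧ s1 = s6 ∧ s1 = 2 * s2))

def find_square_alg (t : List (List (String × Int))) (n : Int) : List (List (List Int)) × List (List (List Int)) :=
  (PySem.List.pyRange 0 n 1).foldl (fun acc1 i =>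
    (PySem.List.pyRange (i+1) n 1).foldl (fun acc2 j =>
      (PySem.List.pyRange (j+1) n 1).foldl (fun acc3 k =>
        (PySem.List.pyRange (k+1) n 1).foldl (fun acc4 l =>
          let a := PySem.List.pyGetD t i []
          let b := PySem.List.pyGetD t j []
          let c := PySem.List.pyGetD t k []
          let d := PySem.List.pyGetD t l []
          if pvSquare a b c d then
            (acc4.1 ++ [[[pvX a, pvY a], [pvX b, pvY b], [pvX c, pvY c], [pvX d, pvY d]]], acc4.2)
          else
            (acc4.1, acc4.2 ++ [[[pvX a, pvY a], [pvX b, pvY b], [pvX c, pvY c], [pvX d, pvY d]]]))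
          acc3)
        acc2)
      acc1)
    ([], [])

-- ===== PORT B =====
-- (p, r) and (q, s) taken as the diagonals of the candidate square:
-- same midpoint, and one diagonal is the other rotated by 90 degrees, nondegenerate.
def pvDiagSquare (p r q s : Int × Int) : Bool :=
  decide (¬ p = r ∧ p.1 + r.1 = q.1 + s.1 ∧ p.2 + r.2 = q.2 + s.2 ∧
    ((q.1 - s.1 = r.2 - p.2 ∧ q.2 - s.2 = p.1 - r.1) ∨
     (q.1 - s.1 = p.2 - r.2 ∧ q.2 - s.2 = r.1 - p.1)))

-- try each of the three ways to split the four points into two diagonals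
def pvIsSquareB (a b c d : Int × Int) : Bool :=
  pvDiagSquare a c b d || pvDiagSquare a d b c || pvDiagSquare a b c d

def find_square_alg_alt (t : List (List (String × Int))) (n : Int) : List (List (List Int)) × List (List (List Int)) :=
  (PySem.List.pyRange 0 n 1).foldl (fun acc1 i =>
    (PySem.List.pyRange (i+1) n 1).foldl (fun acc2 j =>
      (PySem.List.pyRange (j+1) n 1).foldl (fun acc3 k =>
        (PySem.List.pyRange (k+1) n 1).foldl (fun acc4 l =>
          let pi := (pvX (PySem.List.pyGetD t i []), pvY (PySem.List.pyGetD t i []))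
          let pj := (pvX (PySem.List.pyGetD t j []), pvY (PySem.List.pyGetD t j []))
          let pk := (pvX (PySem.List.pyGetD t k []), pvY (PySem.List.pyGetD t k []))
          let pl := (pvX (PySem.List.pyGetD t l []), pvY (PySem.List.pyGetD t l []))
          let quad := [[pi.1, pi.2], [pj.1, pj.2], [pk.1, pk.2], [pl.1, pl.2]]
          if pvIsSquareB pi pj pk pl then
            (acc4.1 ++ [quad], acc4.2)
          else
            (acc4.1, acc4.2 ++ [quad]))
          acc3)
        acc2)
      acc1)
    ([], [])

-- ===== PRECONDITION & SPEC =====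
-- Pre_ excludes exactly the inputs on which Python A raises: when the quadruple
-- loops access t at all (4 ≤ n), every index below n must be in range (else
-- IndexError) and every accessed point dict must carry keys "x" and "y" (else KeyError).
def Pre_find_square_alg (t : List (List (String × Int))) (n : Int) : Prop :=
  4 ≤ n → (n ≤ (t.length : Int) ∧
    ∀ p ∈ t.take n.toNat, (p.lookup "x").isSome ∧ (p.lookup "y").isSome)
instance (t : List (List (String × Int))) (n : Int) : Decidable (Pre_find_square_alg t n) := by
  unfold Pre_find_square_alg; infer_instance

def pvWitness_find_square_alg : (List (List (String × Int))) × Int :=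
  ([[("x", 0), ("y", 0)], [("x", 0), ("y", 1)], [("x", 1), ("y", 0)], [("x", 1), ("y", 1)]], 4)

-- On inputs whose first n points contain a quadruple of coincident points (equal
-- "x"/"y" coordinates) whose dicts are nevertheless not all equal as mappings (e.g. an
-- extra key), A classifies that degenerate quadruple as a square while B puts it among
-- the non-squares; B's answer is the intended one, since four coincident points never
-- form a square and A itself rejects them whenever the dicts happen to be equal.
def D_find_square_alg (t : List (List (String × Int))) (n : Int) : Prop :=
  ∃ i j k l : Fin t.length, i < j ∧ j < k ∧ k < l ∧ ((l : ℕ) : Int) < n ∧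
    (∀ p ∈ [t[i], t[j], t[k], t[l]], ∀ q ∈ [t[i], t[j], t[k], t[l]],
      p.lookup "x" = q.lookup "x" ∧ p.lookup "y" = q.lookup "y") ∧
    ¬ ∀ p ∈ [t[i], t[j], t[k], t[l]], ∀ q ∈ [t[i], t[j], t[k], t[l]],
      ∀ kv ∈ p, p.lookup kv.1 = q.lookup kv.1
instance (t : List (List (String × Int))) (n : Int) : Decidable (D_find_square_alg t n) := by
  unfold D_find_square_alg; infer_instance

def Spec_find_square_alg (t : List (List (String × Int))) (n : Int) (out : List (List (List Int)) × List (List (List Int))) : Prop :=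
  ¬ D_find_square_alg t n → out = find_square_alg_alt t n
instance (t : List (List (String × Int))) (n : Int) (out : List (List (List Int)) × List (List (List Int))) : Decidable (Spec_find_square_alg t n out) := by
  unfold Spec_find_square_alg; infer_instance

def pvDiffWitness_find_square_alg : (List (List (String × Int))) × Int :=
  ([[("x", 0), ("y", 0)], [("x", 0), ("y", 0)], [("x", 0), ("y", 0)], [("x", 0), ("y", 0), ("z", 1)]], 4)

def pvDiffWitnessOut_find_square_alg :
    (List (List (List Int)) × List (List (List Int))) × (List (List (List Int)) × List (List (List Int))) :=
  (([[[0, 0], [0, 0], [0, 0], [0, 0]]], []), ([], [[[0, 0], [0, 0], [0, 0], [0, 0]]]))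

-- ===== CLAIM (what is proved, stated in full; the proofs are below) =====
def Claim_unchanged_find_square_alg : Prop := ∀ (t : List (List (String × Int))) (n : Int), Dom_find_square_alg t n → Pre_find_square_alg t n → Spec_find_square_alg t n (find_square_alg t n)
def Claim_changed_find_square_alg : Prop := Dom_find_square_alg (pvDiffWitness_find_square_alg.1) (pvDiffWitness_find_square_alg.2) ∧ Pre_find_square_alg (pvDiffWitness_find_square_alg.1) (pvDiffWitness_find_square_alg.2) ∧ D_find_square_alg (pvDiffWitness_find_square_alg.1) (pvDiffWitness_find_square_alg.2) ∧ find_square_alg (pvDiffWitness_find_square_alg.1) (pvDiffWitness_find_square_alg.2) = pvDiffWitnessOut_find_square_alg.1 ∧ find_square_alg_alt (pvDiffWitness_find_square_alg.1) (pvDiffWitness_find_square_alg.2) = pvDiffWitnessOut_find_square_alg.2 ∧ pvDiffWitnessOut_find_square_alg.1 ≠ pvDiffWitnessOut_find_square_alg.2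

def Claim_exact_find_square_alg : Prop := ∀ (t : List (List (String × Int))) (n : Int), Dom_find_square_alg t n → Pre_find_square_alg t n → D_find_square_alg t n → find_square_alg t n ≠ find_square_alg_alt t n

-- ===== LEMMAS AND PROOFS =====

theorem pv_sq_add_sq_eq_zero {x y : Int} (h : x^2 + y^2 = 0) : x = 0 ∧ y = 0 := by
  constructor <;> nlinarith [sq_nonneg x, sq_nonneg y]

-- Core geometry for one diagonal pairing (p,r)/(q,s), over ℤ: A's five-equation
-- distance pattern holds iff the two diagonals share their midpoint and one is the
-- ±90°-rotation of the other.
theorem pv_core (px py qx qy rx ry sx sy : Int) :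
    ((px-qx)^2+(py-qy)^2 = (px-sx)^2+(py-sy)^2
     ∧ (px-qx)^2+(py-qy)^2 = (qx-rx)^2+(qy-ry)^2
     ∧ (px-qx)^2+(py-qy)^2 = (rx-sx)^2+(ry-sy)^2
     ∧ (px-rx)^2+(py-ry)^2 = (qx-sx)^2+(qy-sy)^2
     ∧ (px-rx)^2+(py-ry)^2 = 2*((px-qx)^2+(py-qy)^2))
    ↔ (px + rx = qx + sx ∧ py + ry = qy + sy ∧
       ((qx - sx = ry - py ∧ qy - sy = px - rx) ∨
        (qx - sx = py - ry ∧ qy - sy = rx - px))) := by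
  constructor
  · rintro ⟨g1, g2, g3, g4, g5⟩
    have f1 : (px-rx)*(2*qx-px-rx) + (py-ry)*(2*qy-py-ry) = 0 := by linear_combination (-1 : Int) * g2
    have f2 : (px-rx)*(2*sx-px-rx) + (py-ry)*(2*sy-py-ry) = 0 := by linear_combination g1 - g3
    have f3 : (2*qx-px-rx)^2+(2*qy-py-ry)^2 = (px-rx)^2+(py-ry)^2 := by
      linear_combination (-2 : Int)*g5 + 2*f1
    have f4 : (2*sx-px-rx)^2+(2*sy-py-ry)^2 = (px-rx)^2+(py-ry)^2 := by
      linear_combination (-4 : Int)*g1 - 2*g5 + 2*f2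
    have f5 : 2*((2*qx-px-rx)*(2*sx-px-rx)+(2*qy-py-ry)*(2*sy-py-ry)+(px-rx)^2+(py-ry)^2) = 0 := by
      linear_combination f3 + f4 + 4*g4
    have f6 : ((2*qx-px-rx)+(2*sx-px-rx))^2 + ((2*qy-py-ry)+(2*sy-py-ry))^2 = 0 := by
      linear_combination f3 + f4 + f5
    obtain ⟨hPQx, hPQy⟩ := pv_sq_add_sq_eq_zero f6
    have f8 : ((2*qx-px-rx)*(py-ry)-(2*qy-py-ry)*(px-rx))^2 = ((px-rx)^2+(py-ry)^2)^2 := by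
      linear_combination ((px-rx)^2+(py-ry)^2) * f3 - ((px-rx)*(2*qx-px-rx)+(py-ry)*(2*qy-py-ry)) * f1
    have f9 : (((2*qx-px-rx)+(py-ry))^2 + ((2*qy-py-ry)-(px-rx))^2) *
              (((2*qx-px-rx)-(py-ry))^2 + ((2*qy-py-ry)+(px-rx))^2) = 0 := by
      linear_combination ((2*qx-px-rx)^2+(2*qy-py-ry)^2 + 3*((px-rx)^2+(py-ry)^2)) * f3 - 4*f8
    refine ⟨by omega, by omega, ?_⟩
    rcases mul_eq_zero.mp f9 with h | h
    · obtain ⟨hx, hy⟩ := pv_sq_add_sq_eq_zero h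
      exact Or.inl ⟨by omega, by omega⟩
    · obtain ⟨hx, hy⟩ := pv_sq_add_sq_eq_zero h
      exact Or.inr ⟨by omega, by omega⟩
  · rintro ⟨hmx, hmy, ⟨h3, h4⟩ | ⟨h3, h4⟩⟩
    · have hsx : sx = px + rx - qx := by omega
      have hry : ry = py + 2*qx - px - rx := by omega
      have hqy : qy = py + qx - rx := by omega
      have hsy : sy = py + qx - px := by omega
      subst hsx hry hqy hsy
      refine ⟨by ring, by ring, by ring, by ring, by ring⟩
    · have hsx : sx = px + rx - qx := by omega
      have hry : ry = py - 2*qx + px + rx := by omega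
      have hqy : qy = py - qx + rx := by omega
      have hsy : sy = py - qx + px := by omega
      subst hsx hry hqy hsy
      refine ⟨by ring, by ring, by ring, by ring, by ring⟩

-- a degenerate diagonal collapses the whole vector condition to four coincident points
theorem pv_diag_degen {p1 p2 q1 q2 r1 r2 s1 s2 : Int}
    (hm : p1 + r1 = q1 + s1 ∧ p2 + r2 = q2 + s2 ∧
      ((q1 - s1 = r2 - p2 ∧ q2 - s2 = p1 - r1) ∨
       (q1 - s1 = p2 - r2 ∧ q2 - s2 = r1 - p1)))
    (hp1 : p1 = r1) (hp2 : p2 = r2) :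
    q1 = p1 ∧ q2 = p2 ∧ s1 = p1 ∧ s2 = p2 := by
  rcases hm with ⟨h1, h2, ⟨h3, h4⟩ | ⟨h3, h4⟩⟩ <;> omega

-- the two square predicates, expressed on raw coordinates, away from four coincident points
theorem pv_main_iff (x1 y1 x2 y2 x3 y3 x4 y4 : Int)
    (hnc : ¬(((x1, y1) : Int × Int) = (x2, y2) ∧ ((x1, y1) : Int × Int) = (x3, y3) ∧ ((x1, y1) : Int × Int) = (x4, y4))) :
    ((((x1 - x2)^2 + (y1 - y2)^2 = (x1 - x4)^2 + (y1 - y4)^2 ∧ (x1 - x2)^2 + (y1 - y2)^2 = (x2 - x3)^2 + (y2 - y3)^2 ∧ (x1 - x2)^2 + (y1 - y2)^2 = (x3 - x4)^2 + (y3 - y4)^2 ∧ (x1 - x3)^2 + (y1 - y3)^2 = (x2 - x4)^2 + (y2 - y4)^2 ∧ (x1 - x3)^2 + (y1 - y3)^2 = 2 * ((x1 - x2)^2 + (y1 - y2)^2))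
      ∨ ((x1 - x2)^2 + (y1 - y2)^2 = (x1 - x3)^2 + (y1 - y3)^2 ∧ (x1 - x2)^2 + (y1 - y2)^2 = (x2 - x4)^2 + (y2 - y4)^2 ∧ (x1 - x2)^2 + (y1 - y2)^2 = (x3 - x4)^2 + (y3 - y4)^2 ∧ (x1 - x4)^2 + (y1 - y4)^2 = (x2 - x3)^2 + (y2 - y3)^2 ∧ (x1 - x4)^2 + (y1 - y4)^2 = 2 * ((x1 - x2)^2 + (y1 - y2)^2))
      ∨ ((x1 - x3)^2 + (y1 - y3)^2 = (x1 - x4)^2 + (y1 - y4)^2 ∧ (x1 - x3)^2 + (y1 - y3)^2 = (x2 - x3)^2 + (y2 - y3)^2 ∧ (x1 - x3)^2 + (y1 - y3)^2 = (x2 - x4)^2 + (y2 - y4)^2 ∧ (x1 - x2)^2 + (y1 - y2)^2 = (x3 - x4)^2 + (y3 - y4)^2 ∧ (x1 - x2)^2 + (y1 - y2)^2 = 2 * ((x1 - x3)^2 + (y1 - y3)^2)))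
     ↔
     ((¬((x1, y1) : Int × Int) = (x3, y3) ∧ x1 + x3 = x2 + x4 ∧ y1 + y3 = y2 + y4 ∧ ((x2 - x4 = y3 - y1 ∧ y2 - y4 = x1 - x3) ∨ (x2 - x4 = y1 - y3 ∧ y2 - y4 = x3 - x1)))
      ∨ (¬((x1, y1) : Int × Int) = (x4, y4) ∧ x1 + x4 = x2 + x3 ∧ y1 + y4 = y2 + y3 ∧ ((x2 - x3 = y4 - y1 ∧ y2 - y3 = x1 - x4) ∨ (x2 - x3 = y1 - y4 ∧ y2 - y3 = x4 - x1)))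
      ∨ (¬((x1, y1) : Int × Int) = (x2, y2) ∧ x1 + x2 = x3 + x4 ∧ y1 + y2 = y3 + y4 ∧ ((x3 - x4 = y2 - y1 ∧ y3 - y4 = x1 - x2) ∨ (x3 - x4 = y1 - y2 ∧ y3 - y4 = x2 - x1)))))
  := by
  refine or_congr ?_ (or_congr ?_ ?_)
  · have hcore := pv_core x1 y1 x2 y2 x3 y3 x4 y4
    constructor
    · intro hp
      have hr := hcore.mp hp
      refine ⟨?_, hr.1, hr.2.1, hr.2.2⟩
      intro he
      rw [Prod.mk.injEq] at he
      obtain ⟨e1, e2, e3, e4⟩ := pv_diag_degen ⟨hr.1, hr.2.1, hr.2.2⟩ he.1 he.2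
      exact hnc ⟨by simp [e1, e2], by simp [he.1, he.2], by simp [e3, e4]⟩
    · rintro ⟨_, h1, h2, h3⟩
      exact hcore.mpr ⟨h1, h2, h3⟩
  · have e6 : (x3 - x4)^2 + (y3 - y4)^2 = (x4 - x3)^2 + (y4 - y3)^2 := by ring
    rw [e6]
    have hcore := pv_core x1 y1 x2 y2 x4 y4 x3 y3
    constructor
    · intro hp
      have hr := hcore.mp hp
      refine ⟨?_, hr.1, hr.2.1, hr.2.2⟩
      intro he
      rw [Prod.mk.injEq] at he
      obtain ⟨e1, e2, e3, e4⟩ := pv_diag_degen ⟨hr.1, hr.2.1, hr.2.2⟩ he.1 he.2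
      exact hnc ⟨by simp [e1, e2], by simp [e3, e4], by simp [he.1, he.2]⟩
    · rintro ⟨_, h1, h2, h3⟩
      exact hcore.mpr ⟨h1, h2, h3⟩
  · have e4' : (x2 - x3)^2 + (y2 - y3)^2 = (x3 - x2)^2 + (y3 - y2)^2 := by ring
    rw [e4']
    have hcore := pv_core x1 y1 x3 y3 x2 y2 x4 y4
    constructor
    · intro hp
      have hr := hcore.mp hp
      refine ⟨?_, hr.1, hr.2.1, hr.2.2⟩
      intro he
      rw [Prod.mk.injEq] at he
      obtain ⟨e1, e2, e3, e4⟩ := pv_diag_degen ⟨hr.1, hr.2.1, hr.2.2⟩ he.1 he.2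
      exact hnc ⟨by simp [he.1, he.2], by simp [e1, e2], by simp [e3, e4]⟩
    · rintro ⟨_, h1, h2, h3⟩
      exact hcore.mpr ⟨h1, h2, h3⟩

theorem pv_lookup_mem {l : List (String × Int)} {k : String} {v : Int}
    (h : l.lookup k = some v) : (k, v) ∈ l := by
  induction l with
  | nil => simp [List.lookup] at h
  | cons hd tl ih =>
    rw [show hd = (hd.1, hd.2) from rfl, List.lookup_cons] at h
    by_cases hk : (k == hd.1) = true
    · simp [hk] at h
      simp [eq_of_beq hk, ← h]
    · simp [hk] at h
      exact List.mem_cons_of_mem _ (ih h)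

theorem pv_eqv_lookup {a b : List (String × Int)} (h : pvEqv a b = true)
    (k : String) : a.lookup k = b.lookup k := by
  rw [pvEqv, Bool.and_eq_true, List.all_eq_true, List.all_eq_true] at h
  obtain ⟨h1, h2⟩ := h
  cases hx : a.lookup k with
  | some v =>
    have := h1 _ (pv_lookup_mem hx)
    simpa [hx] using (beq_iff_eq.mp this).symm
  | none =>
    cases hy : b.lookup k with
    | none => rfl
    | some w =>
      have := h2 _ (pv_lookup_mem hy)
      rw [beq_iff_eq] at this
      rw [hx] at this
      simp [hy] at this

theorem pv_sameDict_eqv {a b : List (String × Int)}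
    (h1 : ∀ kv ∈ a, a.lookup kv.1 = b.lookup kv.1)
    (h2 : ∀ kv ∈ b, b.lookup kv.1 = a.lookup kv.1) :
    pvEqv a b = true := by
  rw [pvEqv, Bool.and_eq_true, List.all_eq_true, List.all_eq_true]
  constructor
  · intro kv hkv
    rw [beq_iff_eq, h1 kv hkv]
  · intro kv hkv
    rw [beq_iff_eq, h2 kv hkv]

def pvCoords (p : List (String × Int)) : Int × Int := (pvX p, pvY p)

theorem pv_eqv_coords {a b : List (String × Int)} (h : pvEqv a b = true) :
    pvCoords a = pvCoords b := by
  simp [pvCoords, pvX, pvY, pv_eqv_lookup h "x", pv_eqv_lookup h "y"]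

theorem pv_opt_eq {o1 o2 : Option Int} (h1 : o1.isSome) (h2 : o2.isSome)
    (h : o1.getD 0 = o2.getD 0) : o1 = o2 := by
  cases o1 <;> cases o2 <;> simp_all

-- pointwise agreement of the two square tests away from degenerate quadruples
theorem pv_square_eq (a b c d : List (String × Int))
    (h : (pvCoords a = pvCoords b ∧ pvCoords a = pvCoords c ∧ pvCoords a = pvCoords d) →
      (pvEqv a b && pvEqv a c && pvEqv a d && pvEqv b c && pvEqv b d && pvEqv c d) = true) :
    pvSquare a b c d = pvIsSquareB (pvCoords a) (pvCoords b) (pvCoords c) (pvCoords d) := by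
  by_cases hg : (pvEqv a b && pvEqv a c && pvEqv a d && pvEqv b c && pvEqv b d && pvEqv c d) = true
  · have hco : pvCoords a = pvCoords b ∧ pvCoords a = pvCoords c ∧ pvCoords a = pvCoords d := by
      simp only [Bool.and_eq_true] at hg
      exact ⟨pv_eqv_coords hg.1.1.1.1.1, pv_eqv_coords hg.1.1.1.1.2, pv_eqv_coords hg.1.1.1.2⟩
    rw [pvSquare, if_pos hg]
    obtain ⟨h1, h2, h3⟩ := hco
    simp [pvIsSquareB, pvDiagSquare, ← h1, ← h2, ← h3]
  · have hgf : (pvEqv a b && pvEqv a c && pvEqv a d && pvEqv b c && pvEqv b d && pvEqv c d) = false :=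
      by simpa using hg
    have hnc : ¬ (pvCoords a = pvCoords b ∧ pvCoords a = pvCoords c ∧ pvCoords a = pvCoords d) :=
      fun hco => hg (h hco)
    rw [pvSquare, if_neg (by simp [hgf]), Bool.eq_iff_iff]
    simp only [decide_eq_true_eq, pvIsSquareB, Bool.or_eq_true, pvDiagSquare]
    rw [or_assoc]
    exact pv_main_iff (pvX a) (pvY a) (pvX b) (pvY b) (pvX c) (pvY c) (pvX d) (pvY d) hnc

-- ===== tightness: A and B differ everywhere inside D_ (proved via s_list lengths) =====

def pvCA (t : List (List (String × Int))) (i j k l : Int) : ℕ :=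
  if pvSquare (PySem.List.pyGetD t i []) (PySem.List.pyGetD t j [])
      (PySem.List.pyGetD t k []) (PySem.List.pyGetD t l []) then 1 else 0

def pvCB (t : List (List (String × Int))) (i j k l : Int) : ℕ :=
  if pvIsSquareB (pvCoords (PySem.List.pyGetD t i [])) (pvCoords (PySem.List.pyGetD t j []))
      (pvCoords (PySem.List.pyGetD t k [])) (pvCoords (PySem.List.pyGetD t l [])) then 1 else 0

def pvCA3 (t : List (List (String × Int))) (n i j k : Int) : ℕ :=
  ((PySem.List.pyRange (k+1) n 1).map (pvCA t i j k)).sum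
def pvCA2 (t : List (List (String × Int))) (n i j : Int) : ℕ :=
  ((PySem.List.pyRange (j+1) n 1).map (pvCA3 t n i j)).sum
def pvCA1 (t : List (List (String × Int))) (n i : Int) : ℕ :=
  ((PySem.List.pyRange (i+1) n 1).map (pvCA2 t n i)).sum
def pvCB3 (t : List (List (String × Int))) (n i j k : Int) : ℕ :=
  ((PySem.List.pyRange (k+1) n 1).map (pvCB t i j k)).sum
def pvCB2 (t : List (List (String × Int))) (n i j : Int) : ℕ :=
  ((PySem.List.pyRange (j+1) n 1).map (pvCB3 t n i j)).sum
def pvCB1 (t : List (List (String × Int))) (n i : Int) : ℕ :=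
  ((PySem.List.pyRange (i+1) n 1).map (pvCB2 t n i)).sum

theorem pv_len_foldl {α X Y : Type} (F : List X × List Y → α → List X × List Y) (c : α → ℕ)
    (h : ∀ acc a, (F acc a).1.length = acc.1.length + c a) :
    ∀ (L : List α) (acc : List X × List Y),
      (L.foldl F acc).1.length = acc.1.length + (L.map c).sum := by
  intro L
  induction L with
  | nil => intro acc; simp
  | cons hd tl ih =>
    intro acc
    rw [List.foldl_cons, ih, h, List.map_cons, List.sum_cons]
    omega

theorem pv_lenA (t : List (List (String × Int))) (n : Int) :
    (find_square_alg t n).1.length = ((PySem.List.pyRange 0 n 1).map (pvCA1 t n)).sum := by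
  unfold find_square_alg
  refine (pv_len_foldl _ (pvCA1 t n) ?_ _ _).trans (by simp)
  intro acc1 i
  refine (pv_len_foldl _ (pvCA2 t n i) ?_ _ _).trans rfl
  intro acc2 j
  refine (pv_len_foldl _ (pvCA3 t n i j) ?_ _ _).trans rfl
  intro acc3 k
  refine (pv_len_foldl _ (pvCA t i j k) ?_ _ _).trans rfl
  intro acc4 l
  dsimp only
  by_cases hs : pvSquare (PySem.List.pyGetD t i []) (PySem.List.pyGetD t j [])
      (PySem.List.pyGetD t k []) (PySem.List.pyGetD t l []) = true
  · simp [hs, pvCA]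
  · simp [hs, pvCA]

theorem pv_lenB (t : List (List (String × Int))) (n : Int) :
    (find_square_alg_alt t n).1.length = ((PySem.List.pyRange 0 n 1).map (pvCB1 t n)).sum := by
  unfold find_square_alg_alt
  refine (pv_len_foldl _ (pvCB1 t n) ?_ _ _).trans (by simp)
  intro acc1 i
  refine (pv_len_foldl _ (pvCB2 t n i) ?_ _ _).trans rfl
  intro acc2 j
  refine (pv_len_foldl _ (pvCB3 t n i j) ?_ _ _).trans rfl
  intro acc3 k
  refine (pv_len_foldl _ (pvCB t i j k) ?_ _ _).trans rfl
  intro acc4 l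
  dsimp only
  by_cases hs : pvIsSquareB (pvX (PySem.List.pyGetD t i []), pvY (PySem.List.pyGetD t i []))
      (pvX (PySem.List.pyGetD t j []), pvY (PySem.List.pyGetD t j []))
      (pvX (PySem.List.pyGetD t k []), pvY (PySem.List.pyGetD t k []))
      (pvX (PySem.List.pyGetD t l []), pvY (PySem.List.pyGetD t l [])) = true
  · simp [hs, pvCB, pvCoords]
  · simp [hs, pvCB, pvCoords]

-- if B calls a quadruple a square, so does A
theorem pv_B_imp_A (a b c d : List (String × Int))
    (hB : pvIsSquareB (pvCoords a) (pvCoords b) (pvCoords c) (pvCoords d) = true) :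
    pvSquare a b c d = true := by
  have h : (pvCoords a = pvCoords b ∧ pvCoords a = pvCoords c ∧ pvCoords a = pvCoords d) →
      (pvEqv a b && pvEqv a c && pvEqv a d && pvEqv b c && pvEqv b d && pvEqv c d) = true := by
    intro hco
    exfalso
    simp only [pvIsSquareB, Bool.or_eq_true, pvDiagSquare, decide_eq_true_eq] at hB
    rcases hB with (h | h) | h
    exacts [h.1 hco.2.1, h.1 hco.2.2, h.1 hco.1]
  rw [pv_square_eq a b c d h]
  exact hB

theorem pv_cB_le_cA (t : List (List (String × Int))) (i j k l : Int) :
    pvCB t i j k l ≤ pvCA t i j k l := by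
  by_cases hb : pvIsSquareB (pvCoords (PySem.List.pyGetD t i [])) (pvCoords (PySem.List.pyGetD t j []))
      (pvCoords (PySem.List.pyGetD t k [])) (pvCoords (PySem.List.pyGetD t l [])) = true
  · simp [pvCB, pvCA, hb, pv_B_imp_A _ _ _ _ hb]
  · simp [pvCB, hb]

-- A accepts a coincident quadruple whose dicts are not all equal...
theorem pv_degen_A (a b c d : List (String × Int))
    (h1 : pvCoords a = pvCoords b) (h2 : pvCoords a = pvCoords c) (h3 : pvCoords a = pvCoords d)
    (hg : (pvEqv a b && pvEqv a c && pvEqv a d && pvEqv b c && pvEqv b d && pvEqv c d) = false) :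
    pvSquare a b c d = true := by
  rw [pvSquare, if_neg (by simp [hg])]
  simp only [pvCoords, Prod.mk.injEq] at h1 h2 h3
  simp only [decide_eq_true_eq]
  left
  rw [← h1.1, ← h1.2, ← h2.1, ← h2.2, ← h3.1, ← h3.2]
  norm_num

-- ...while B rejects it
theorem pv_degen_B (a b c d : List (String × Int))
    (h1 : pvCoords a = pvCoords b) (h2 : pvCoords a = pvCoords c) (h3 : pvCoords a = pvCoords d) :
    pvIsSquareB (pvCoords a) (pvCoords b) (pvCoords c) (pvCoords d) = false := by
  simp [pvIsSquareB, pvDiagSquare, ← h1, ← h2, ← h3]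

-- ===== VERDICT (by name: the statements are the Claim_ definitions above) =====
theorem find_square_alg_spec : Claim_unchanged_find_square_alg := by
  intro t n _ hpre hnd
  show find_square_alg t n = find_square_alg_alt t n
  unfold find_square_alg find_square_alg_alt
  refine List.foldl_ext _ _ _ ?_
  intro acc1 i hi
  refine List.foldl_ext _ _ _ ?_
  intro acc2 j hj
  refine List.foldl_ext _ _ _ ?_
  intro acc3 k hk
  refine List.foldl_ext _ _ _ ?_
  intro acc4 l hl
  rw [PySem.List.mem_pyRange_one] at hi hj hk hl
  have hn4 : (4 : Int) ≤ n := by omega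
  obtain ⟨hlen, hkeys⟩ := hpre hn4
  have hlt : ∀ m : Int, 0 ≤ m → m < n → m.toNat < t.length := by
    intro m h0 h1; omega
  have hgetd : ∀ m : Int, 0 ≤ m → m < n → PySem.List.pyGetD t m [] = t.getD m.toNat [] := by
    intro m h0 h1
    rw [PySem.List.pyGetD_eq_getElem _ _ h0 (by exact_mod_cast lt_of_lt_of_le h1 hlen),
      List.getD_eq_getElem _ _ (hlt m h0 h1)]
  have hmem : ∀ m : Int, 0 ≤ m → m < n → t.getD m.toNat [] ∈ t.take n.toNat := by
    intro m h0 h1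
    rw [List.getD_eq_getElem _ _ (hlt m h0 h1)]
    have h3 : m.toNat < (t.take n.toNat).length := by simp; omega
    rw [← List.getElem_take (h := h3)]
    exact List.getElem_mem _
  dsimp only
  rw [hgetd i (by omega) (by omega), hgetd j (by omega) (by omega),
    hgetd k (by omega) (by omega), hgetd l (by omega) (by omega)]
  have hcond : (pvCoords (t.getD i.toNat []) = pvCoords (t.getD j.toNat []) ∧
      pvCoords (t.getD i.toNat []) = pvCoords (t.getD k.toNat []) ∧
      pvCoords (t.getD i.toNat []) = pvCoords (t.getD l.toNat [])) →
      (pvEqv (t.getD i.toNat []) (t.getD j.toNat []) && pvEqv (t.getD i.toNat []) (t.getD k.toNat []) &&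
       pvEqv (t.getD i.toNat []) (t.getD l.toNat []) && pvEqv (t.getD j.toNat []) (t.getD k.toNat []) &&
       pvEqv (t.getD j.toNat []) (t.getD l.toNat []) && pvEqv (t.getD k.toNat []) (t.getD l.toNat [])) = true := by
    intro hco
    by_contra hg
    apply hnd
    have e : ∀ (m : Int) (h0 : 0 ≤ m) (h1 : m < n),
        t[(⟨m.toNat, hlt m h0 h1⟩ : Fin t.length)] = t.getD m.toNat [] := by
      intro m h0 h1
      rw [List.getD_eq_getElem _ _ (hlt m h0 h1)]
      rfl
    have hxy : ∀ m : Int, 0 ≤ m → m < n →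
        ((t.getD m.toNat []).lookup "x").isSome ∧ ((t.getD m.toNat []).lookup "y").isSome := by
      intro m h0 h1
      exact hkeys _ (hmem m h0 h1)
    rw [pvCoords, pvCoords, pvCoords, pvCoords, Prod.mk.injEq, Prod.mk.injEq, Prod.mk.injEq] at hco
    have cjx : (t.getD j.toNat []).lookup "x" = (t.getD i.toNat []).lookup "x" :=
      (pv_opt_eq (hxy i (by omega) (by omega)).1 (hxy j (by omega) (by omega)).1 hco.1.1).symm
    have cjy : (t.getD j.toNat []).lookup "y" = (t.getD i.toNat []).lookup "y" :=
      (pv_opt_eq (hxy i (by omega) (by omega)).2 (hxy j (by omega) (by omega)).2 hco.1.2).symm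
    have ckx : (t.getD k.toNat []).lookup "x" = (t.getD i.toNat []).lookup "x" :=
      (pv_opt_eq (hxy i (by omega) (by omega)).1 (hxy k (by omega) (by omega)).1 hco.2.1.1).symm
    have cky : (t.getD k.toNat []).lookup "y" = (t.getD i.toNat []).lookup "y" :=
      (pv_opt_eq (hxy i (by omega) (by omega)).2 (hxy k (by omega) (by omega)).2 hco.2.1.2).symm
    have clx : (t.getD l.toNat []).lookup "x" = (t.getD i.toNat []).lookup "x" :=
      (pv_opt_eq (hxy i (by omega) (by omega)).1 (hxy l (by omega) (by omega)).1 hco.2.2.1).symm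
    have cly : (t.getD l.toNat []).lookup "y" = (t.getD i.toNat []).lookup "y" :=
      (pv_opt_eq (hxy i (by omega) (by omega)).2 (hxy l (by omega) (by omega)).2 hco.2.2.2).symm
    refine ⟨⟨i.toNat, hlt i (by omega) (by omega)⟩, ⟨j.toNat, hlt j (by omega) (by omega)⟩,
      ⟨k.toNat, hlt k (by omega) (by omega)⟩, ⟨l.toNat, hlt l (by omega) (by omega)⟩,
      Fin.mk_lt_mk.mpr (by omega), Fin.mk_lt_mk.mpr (by omega), Fin.mk_lt_mk.mpr (by omega),
      by show ((l.toNat : ℕ) : Int) < n; omega, ?_, ?_⟩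
    · rw [e i (by omega) (by omega), e j (by omega) (by omega), e k (by omega) (by omega),
        e l (by omega) (by omega)]
      have hx : ∀ r ∈ [t.getD i.toNat [], t.getD j.toNat [], t.getD k.toNat [], t.getD l.toNat []],
          r.lookup "x" = (t.getD i.toNat []).lookup "x" ∧
          r.lookup "y" = (t.getD i.toNat []).lookup "y" := by
        intro r hr
        simp only [List.mem_cons, List.not_mem_nil, or_false] at hr
        rcases hr with rfl | rfl | rfl | rfl
        exacts [⟨rfl, rfl⟩, ⟨cjx, cjy⟩, ⟨ckx, cky⟩, ⟨clx, cly⟩]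
      intro p hp q hq
      exact ⟨((hx p hp).1).trans ((hx q hq).1).symm, ((hx p hp).2).trans ((hx q hq).2).symm⟩
    · rw [e i (by omega) (by omega), e j (by omega) (by omega), e k (by omega) (by omega),
        e l (by omega) (by omega)]
      intro hall
      have hmm : ∀ r ∈ [t.getD i.toNat [], t.getD j.toNat [], t.getD k.toNat [], t.getD l.toNat []],
          True := fun _ _ => trivial
      have eqv2 : ∀ p ∈ [t.getD i.toNat [], t.getD j.toNat [], t.getD k.toNat [], t.getD l.toNat []],
          ∀ q ∈ [t.getD i.toNat [], t.getD j.toNat [], t.getD k.toNat [], t.getD l.toNat []],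
          pvEqv p q = true := by
        intro p hp q hq
        exact pv_sameDict_eqv (fun kv hkv => hall p hp q hq kv hkv) (fun kv hkv => hall q hq p hp kv hkv)
      apply hg
      rw [eqv2 _ (by simp) _ (by simp), eqv2 _ (by simp) _ (by simp), eqv2 _ (by simp) _ (by simp),
        eqv2 _ (by simp) _ (by simp), eqv2 _ (by simp) _ (by simp), eqv2 _ (by simp) _ (by simp)]
      rfl
  rw [pv_square_eq _ _ _ _ hcond]
  rfl

theorem find_square_alg_changed : Claim_changed_find_square_alg := by
  unfold Claim_changed_find_square_alg; decide

theorem find_square_alg_tight : Claim_exact_find_square_alg := by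
  intro t n _ hpre hD heq
  obtain ⟨i', j', k', l', hij, hjk, hkl, hln, hcoin, hnall⟩ := hD
  have vij : (i' : ℕ) < (j' : ℕ) := hij
  have vjk : (j' : ℕ) < (k' : ℕ) := hjk
  have vkl : (k' : ℕ) < (l' : ℕ) := hkl
  have hn4 : (4 : Int) ≤ n := by omega
  obtain ⟨hlen, _⟩ := hpre hn4
  -- the four accessed dicts, in t.getD form
  have hget : ∀ m : Fin t.length, PySem.List.pyGetD t ((m : ℕ) : Int) [] = t[m] := by
    intro m
    rw [PySem.List.pyGetD_eq_getElem _ _ (by exact_mod_cast Nat.zero_le _) (by exact_mod_cast m.isLt)]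
    simp only [Int.toNat_natCast]
    rfl
  -- coincidence facts
  have hcx : ∀ p ∈ [t[i'], t[j'], t[k'], t[l']], ∀ q ∈ [t[i'], t[j'], t[k'], t[l']],
      pvCoords p = pvCoords q := by
    intro p hp q hq
    obtain ⟨hx, hy⟩ := hcoin p hp q hq
    simp [pvCoords, pvX, pvY, hx, hy]
  have m1 : t[i'] ∈ [t[i'], t[j'], t[k'], t[l']] := by simp
  have m2 : t[j'] ∈ [t[i'], t[j'], t[k'], t[l']] := by simp
  have m3 : t[k'] ∈ [t[i'], t[j'], t[k'], t[l']] := by simp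
  have m4 : t[l'] ∈ [t[i'], t[j'], t[k'], t[l']] := by simp
  -- the guard of A is false on the witness quadruple
  have hgf : (pvEqv t[i'] t[j'] && pvEqv t[i'] t[k'] && pvEqv t[i'] t[l'] &&
      pvEqv t[j'] t[k'] && pvEqv t[j'] t[l'] && pvEqv t[k'] t[l']) = false := by
    by_contra hgt
    obtain ⟨e12, e13, e14, e23, e24, e34⟩ :
        pvEqv t[i'] t[j'] = true ∧ pvEqv t[i'] t[k'] = true ∧ pvEqv t[i'] t[l'] = true ∧
        pvEqv t[j'] t[k'] = true ∧ pvEqv t[j'] t[l'] = true ∧ pvEqv t[k'] t[l'] = true := by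
      simpa using hgt
    apply hnall
    have hk : ∀ r ∈ [t[i'], t[j'], t[k'], t[l']], ∀ key : String,
        r.lookup key = t[i'].lookup key := by
      intro r hr key
      simp only [List.mem_cons, List.not_mem_nil, or_false] at hr
      rcases hr with rfl | rfl | rfl | rfl
      exacts [rfl, (pv_eqv_lookup e12 key).symm, (pv_eqv_lookup e13 key).symm,
        (pv_eqv_lookup e14 key).symm]
    intro p hp q hq kv _
    rw [hk p hp kv.1, hk q hq kv.1]
  -- strict inequality of the s_list lengths
  have hwit : pvCB t (i' : ℕ) (j' : ℕ) (k' : ℕ) (l' : ℕ) < pvCA t (i' : ℕ) (j' : ℕ) (k' : ℕ) (l' : ℕ) := by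
    rw [pvCA, pvCB, hget i', hget j', hget k', hget l']
    rw [pv_degen_B _ _ _ _ (hcx _ m1 _ m2) (hcx _ m1 _ m3) (hcx _ m1 _ m4),
      if_pos (pv_degen_A _ _ _ _ (hcx _ m1 _ m2) (hcx _ m1 _ m3) (hcx _ m1 _ m4) hgf)]
    norm_num
  have s3 : pvCB3 t n (i' : ℕ) (j' : ℕ) (k' : ℕ) < pvCA3 t n (i' : ℕ) (j' : ℕ) (k' : ℕ) :=
    List.sum_lt_sum _ _ (fun l _ => pv_cB_le_cA t _ _ _ l)
      ⟨((l' : ℕ) : Int), PySem.List.mem_pyRange_one.mpr ⟨by omega, by omega⟩, hwit⟩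
  have s2 : pvCB2 t n (i' : ℕ) (j' : ℕ) < pvCA2 t n (i' : ℕ) (j' : ℕ) :=
    List.sum_lt_sum _ _ (fun k _ => List.sum_le_sum (fun l _ => pv_cB_le_cA t _ _ _ l))
      ⟨((k' : ℕ) : Int), PySem.List.mem_pyRange_one.mpr ⟨by omega, by omega⟩, s3⟩
  have s1 : pvCB1 t n (i' : ℕ) < pvCA1 t n (i' : ℕ) :=
    List.sum_lt_sum _ _
      (fun j _ => List.sum_le_sum (fun k _ => List.sum_le_sum (fun l _ => pv_cB_le_cA t _ _ _ l)))
      ⟨((j' : ℕ) : Int), PySem.List.mem_pyRange_one.mpr ⟨by omega, by omega⟩, s2⟩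
  have s0 : ((PySem.List.pyRange 0 n 1).map (pvCB1 t n)).sum <
      ((PySem.List.pyRange 0 n 1).map (pvCA1 t n)).sum :=
    List.sum_lt_sum _ _
      (fun i _ => List.sum_le_sum (fun j _ => List.sum_le_sum
        (fun k _ => List.sum_le_sum (fun l _ => pv_cB_le_cA t _ _ _ l))))
      ⟨((i' : ℕ) : Int), PySem.List.mem_pyRange_one.mpr ⟨by omega, by omega⟩, s1⟩
  have hlenEq : (find_square_alg t n).1.length = (find_square_alg_alt t n).1.length := by
    rw [heq]
  rw [pv_lenA, pv_lenB] at hlenEq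
  omega
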